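-- pv_equiv track=rewrite | github.com/Prajwalkhandait109/Dailycode | Sandwitched_vowels.py | Sandwiched_Vowel
-- ===== SOURCE A (Python) =====
-- def Sandwiched_Vowel(s):
--     #Complete the function
--     vowels = set('aeiou')
--     n = len(s)
--     result = []
--
--     for i in range(n):
--         # Check if s[i] is a vowel
--         if s[i] in vowels:
--             # Check if it has consonants on both sides
--             if i > 0 and i < n-1 and s[i-1] not in vowels and s[i+1] not in vowels:
--                 continue  # Skip this vowel!
--         # Add character to result
--         result.append(s[i])
--
--     return ''.join(result)
-- ===== SOURCE B (Python) =====
-- def Sandwiched_Vowel(s):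
--     # Run-length decomposition: split s into maximal runs of equal vowel-ness,
--     # then join all runs except interior single-vowel runs.
--     vowels = set('aeiou')
--     runs = []
--     i, n = 0, len(s)
--     while i < n:
--         isv = s[i] in vowels
--         j = i + 1
--         while j < n and (s[j] in vowels) == isv:
--             j += 1
--         runs.append(s[i:j])
--         i = j
--     out = []
--     for j, r in enumerate(runs):
--         if not (len(r) == 1 and r in vowels and 0 < j < len(runs) - 1):
--             out.append(r)
--     return ''.join(out)
-- ===== Notes on version B (the rewrite author's own statement) =====
-- stated objective: alternative
-- what changed: A tests each index's two neighbours inside one range(n) loop; B first splits the string into maximal runs of equal vowel-ness, then joins all runs except interior single-vowel runs.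
import Mathlib
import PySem

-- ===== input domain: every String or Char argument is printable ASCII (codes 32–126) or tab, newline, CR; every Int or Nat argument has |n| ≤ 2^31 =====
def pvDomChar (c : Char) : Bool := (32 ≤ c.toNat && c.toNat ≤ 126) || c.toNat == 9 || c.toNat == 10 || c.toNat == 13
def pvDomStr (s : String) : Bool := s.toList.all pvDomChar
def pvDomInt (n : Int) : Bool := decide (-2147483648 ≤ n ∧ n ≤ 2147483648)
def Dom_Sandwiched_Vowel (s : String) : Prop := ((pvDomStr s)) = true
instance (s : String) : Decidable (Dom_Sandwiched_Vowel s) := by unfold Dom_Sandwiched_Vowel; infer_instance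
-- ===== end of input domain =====

-- B replaces A's per-index neighbour test by a run-length decomposition: split s
-- into maximal runs of equal vowel-ness, then join all runs except interior
-- single-vowel runs (alternative algorithm, same O(n) cost).

-- ===== PORT A =====
-- vowels = set('aeiou')
def pvVowels : PySem.Set Char := PySem.Set.ofList "aeiou".toList

def Sandwiched_Vowel (s : String) : String :=
  let cs := s.toList
  let n : Int := (cs.length : Int)
  -- for i in range(n): if s[i] in vowels and i>0 and i<n-1 and s[i-1] not in vowels and s[i+1] not in vowels: continue; result.append(s[i])
  let result : List Char :=
    (PySem.List.pyRange 0 n 1).foldl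
      (fun acc i =>
        if PySem.List.pyGetD cs i ' ' ∈ pvVowels ∧
           0 < i ∧ i < n - 1 ∧
           PySem.List.pyGetD cs (i - 1) ' ' ∉ pvVowels ∧
           PySem.List.pyGetD cs (i + 1) ' ' ∉ pvVowels
        then acc
        else acc ++ [PySem.List.pyGetD cs i ' ']) []
  String.ofList result

-- ===== PORT B =====
-- 'c in vowels' as a Bool
def pvIsV (c : Char) : Bool := decide (c ∈ pvVowels)

-- stage 1 of Source B: the outer while loop peels one maximal run s[i:j] per step
-- (the inner 'while j < n and (s[j] in vowels) == isv: j += 1' scan is the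
-- takeWhile/dropWhile split of the remaining suffix at the first vowel-ness change)
def pvRunsOf : List Char → List (List Char)
  | [] => []
  | c :: rest =>
    (c :: rest.takeWhile (fun d => pvIsV d == pvIsV c)) ::
      pvRunsOf (rest.dropWhile (fun d => pvIsV d == pvIsV c))
termination_by t => t.length
decreasing_by simpa using Nat.lt_succ_of_le (List.length_dropWhile_le _ _)

-- stage 2 of Source B: for j, r in enumerate(runs): keep r unless it is an interior
-- single vowel (len(r) == 1 and r in vowels and 0 < j < len(runs) - 1)
def Sandwiched_Vowel_alt (s : String) : String :=
  let runs := pvRunsOf s.toList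
  let out : List (List Char) :=
    (PySem.List.enumerate runs).foldl
      (fun out jr =>
        if !(jr.2.length == 1 && pvIsV (jr.2.headD ' ') &&
             decide (0 < jr.1) && decide (jr.1 < (runs.length : Int) - 1))
        then out ++ [jr.2] else out) []
  String.ofList out.flatten

-- ===== PRECONDITION & SPEC =====
def Spec_Sandwiched_Vowel (s : String) (out : String) : Prop := out = Sandwiched_Vowel_alt s
instance (s : String) (out : String) : Decidable (Spec_Sandwiched_Vowel s out) := by unfold Spec_Sandwiched_Vowel; infer_instance

-- ===== CLAIM =====
def Claim_equal_Sandwiched_Vowel : Prop := ∀ (s : String), Dom_Sandwiched_Vowel s → Spec_Sandwiched_Vowel s (Sandwiched_Vowel s)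

-- ===== LEMMAS AND PROOFS =====

-- common characterisation of A's result: structural recursion carrying the previous char
def pvCond (prev : Option Char) (c : Char) (nxt : Option Char) : Bool :=
  decide (c ∈ pvVowels) && prev.any (fun pc => !decide (pc ∈ pvVowels))
    && nxt.any (fun nc => !decide (nc ∈ pvVowels))

def pvCore (prev : Option Char) : List Char → List Char
  | [] => []
  | c :: rest =>
    (if pvCond prev c rest.head? then [] else [c]) ++ pvCore (some c) rest

-- pure first/rest form of B's stage-2 loop
def pvEmitP : List (List Char) → Bool → List Char
  | [], _ => []
  | r :: rs, first =>
    (if r.length == 1 && pvIsV (r.headD ' ') && !first && !rs.isEmpty then [] else r)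
      ++ pvEmitP rs false

-- ---------- A's loop equals pvCore ----------
theorem pvA_core (cs : List Char) : ∀ (m k : Nat), m = cs.length - k → k ≤ cs.length →
    ∀ (acc : List Char),
    (List.range' k m).foldl
      (fun acc j =>
        if cs.getD j ' ' ∈ pvVowels ∧
           0 < j ∧ j < cs.length - 1 ∧
           cs.getD (j - 1) ' ' ∉ pvVowels ∧
           cs.getD (j + 1) ' ' ∉ pvVowels
        then acc
        else acc ++ [cs.getD j ' ']) acc
    = acc ++ pvCore (if 0 < k then some (cs.getD (k-1) ' ') else none) (cs.drop k) := by
  intro m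
  induction m with
  | zero =>
    intro k hm hk acc
    have h1 : cs.length ≤ k := by omega
    have : cs.drop k = [] := List.drop_eq_nil_iff.mpr h1
    simp [this, pvCore]
  | succ m ih =>
    intro k hm hk acc
    have hklt : k < cs.length := by omega
    have hdrop : cs.drop k = cs[k] :: cs.drop (k+1) := by
      rw [List.drop_eq_getElem_cons hklt]
    rw [List.range'_succ, List.foldl_cons, hdrop]
    have hget : cs.getD k ' ' = cs[k] := List.getD_eq_getElem cs ' ' hklt
    have hnext : (cs.drop (k+1)).head? = cs[k+1]? := List.head?_drop
    have hprev : (if 0 < k + 1 then some (cs.getD (k+1-1) ' ') else none) = some cs[k] := by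
      rw [if_pos (Nat.succ_pos k)]
      simp only [Nat.add_sub_cancel]
      rw [hget]
    have hcond :
        (cs.getD k ' ' ∈ pvVowels ∧ 0 < k ∧ k < cs.length - 1 ∧
          cs.getD (k - 1) ' ' ∉ pvVowels ∧ cs.getD (k + 1) ' ' ∉ pvVowels)
        ↔ pvCond (if 0 < k then some (cs.getD (k-1) ' ') else none) cs[k]
            (cs.drop (k+1)).head? = true := by
      rw [hget, hnext, pvCond]
      by_cases h0 : 0 < k
      · rw [if_pos h0]
        by_cases h1 : k < cs.length - 1
        · have h2 : k + 1 < cs.length := by omega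
          have e1 : cs[k+1]? = some cs[k+1] := List.getElem?_eq_getElem h2
          have e2 : cs.getD (k+1) ' ' = cs[k+1] := List.getD_eq_getElem cs ' ' h2
          rw [e1, e2]
          simp only [Option.any_some, Bool.and_eq_true, decide_eq_true_eq,
            Bool.not_eq_true', decide_eq_false_iff_not]
          constructor
          · rintro ⟨a, _, _, b, c⟩; exact ⟨⟨a, b⟩, c⟩
          · rintro ⟨⟨a, b⟩, c⟩; exact ⟨a, h0, h1, b, c⟩
        · have e1 : cs[k+1]? = none := List.getElem?_eq_none (by omega)
          rw [e1]
          simp [h1]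
      · rw [if_neg h0]
        simp [h0]
    rw [pvCore]
    by_cases hcase : cs.getD k ' ' ∈ pvVowels ∧ 0 < k ∧ k < cs.length - 1 ∧
        cs.getD (k - 1) ' ' ∉ pvVowels ∧ cs.getD (k + 1) ' ' ∉ pvVowels
    · rw [if_pos hcase, if_pos (hcond.mp hcase)]
      rw [ih (k+1) (by omega) (by omega) acc, hprev]
      simp
    · rw [if_neg hcase, if_neg (fun h => hcase (hcond.mpr h))]
      rw [ih (k+1) (by omega) (by omega) (acc ++ [cs.getD k ' ']), hprev, hget]
      simp

theorem pvA_main (cs : List Char) :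
    (PySem.List.pyRange 0 (cs.length : Int) 1).foldl
      (fun acc i =>
        if PySem.List.pyGetD cs i ' ' ∈ pvVowels ∧
           0 < i ∧ i < (cs.length : Int) - 1 ∧
           PySem.List.pyGetD cs (i - 1) ' ' ∉ pvVowels ∧
           PySem.List.pyGetD cs (i + 1) ' ' ∉ pvVowels
        then acc
        else acc ++ [PySem.List.pyGetD cs i ' ']) []
    = pvCore none cs := by
  rw [PySem.List.pyRange_one]
  simp only [sub_zero, Int.toNat_natCast, List.foldl_map, zero_add]
  have hfun : (fun (acc : List Char) (j : Nat) =>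
      if PySem.List.pyGetD cs (j : Int) ' ' ∈ pvVowels ∧
         0 < (j : Int) ∧ (j : Int) < (cs.length : Int) - 1 ∧
         PySem.List.pyGetD cs ((j : Int) - 1) ' ' ∉ pvVowels ∧
         PySem.List.pyGetD cs ((j : Int) + 1) ' ' ∉ pvVowels
      then acc
      else acc ++ [PySem.List.pyGetD cs (j : Int) ' '])
      = (fun (acc : List Char) (j : Nat) =>
      if cs.getD j ' ' ∈ pvVowels ∧
         0 < j ∧ j < cs.length - 1 ∧
         cs.getD (j - 1) ' ' ∉ pvVowels ∧
         cs.getD (j + 1) ' ' ∉ pvVowels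
      then acc
      else acc ++ [cs.getD j ' ']) := by
    funext acc j
    have hg : PySem.List.pyGetD cs (j : Int) ' ' = cs.getD j ' ' :=
      PySem.List.pyGetD_natCast cs j ' '
    have hg1 : PySem.List.pyGetD cs ((j : Int) + 1) ' ' = cs.getD (j + 1) ' ' := by
      rw [show ((j : Int) + 1) = ((j + 1 : Nat) : Int) by push_cast; ring]
      exact PySem.List.pyGetD_natCast cs (j+1) ' '
    by_cases h0 : 0 < j
    · have hgm : PySem.List.pyGetD cs ((j : Int) - 1) ' ' = cs.getD (j - 1) ' ' := by
        rw [show ((j : Int) - 1) = ((j - 1 : Nat) : Int) by omega]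
        exact PySem.List.pyGetD_natCast cs (j-1) ' '
      rw [hg, hg1, hgm]
      exact if_congr
        ⟨fun ⟨a, b, c, d, e⟩ => ⟨a, by omega, by omega, d, e⟩,
         fun ⟨a, b, c, d, e⟩ => ⟨a, by omega, by omega, d, e⟩⟩ rfl rfl
    · have hj0 : j = 0 := by omega
      subst hj0
      simp [PySem.List.pyGetD_zero, List.getD]
  rw [hfun, List.range_eq_range',
    pvA_core cs cs.length 0 (by omega) (by omega) []]
  simp

-- ---------- B's enumerate loop equals pvEmitP ----------
theorem pvRunsOf_eq_nil (cs : List Char) : pvRunsOf cs = [] ↔ cs = [] := by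
  cases cs <;> simp [pvRunsOf]

theorem pvLastShift (t : List Char) (b a : Char) :
    (b :: t).getLast?.getD a = t.getLast?.getD b := by
  cases t with
  | nil => rfl
  | cons c u =>
    rw [List.getLast?_cons_cons]
    cases h : (c :: u).getLast? with
    | none => simp at h
    | some x => simp

theorem pvEnum (n : Nat) : ∀ (rs : List (List Char)) (k : Nat), k + rs.length = n →
    ∀ (acc : List (List Char)),
    ((PySem.List.enumerate rs (k : Int)).foldl
      (fun out jr =>
        if !(jr.2.length == 1 && pvIsV (jr.2.headD ' ') &&
             decide (0 < jr.1) && decide (jr.1 < (n : Int) - 1))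
        then out ++ [jr.2] else out) acc).flatten
    = acc.flatten ++ pvEmitP rs (decide (k = 0)) := by
  intro rs
  induction rs with
  | nil => intro k _ acc; simp [pvEmitP, PySem.List.enumerate_nil]
  | cons r t ih =>
    intro k hk acc
    rw [PySem.List.enumerate_cons, List.foldl_cons]
    have h1 : decide (0 < (k : Int)) = !decide (k = 0) := by
      rcases Nat.eq_zero_or_pos k with h | h
      · subst h; simp
      · simp [Nat.pos_iff_ne_zero.mp h]
        omega
    have h2 : decide ((k : Int) < (n : Int) - 1) = !t.isEmpty := by
      rcases t with _ | ⟨x, xs⟩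
      · have hx : ¬((k : Int) < (n : Int) - 1) := by simp only [List.length_cons, List.length_nil] at hk; omega
        simp [hx]
      · have hx : ((k : Int) < (n : Int) - 1) := by simp only [List.length_cons] at hk; omega
        simp [hx]
    rw [h1, h2]
    have hcast : (k : Int) + 1 = ((k + 1 : Nat) : Int) := by push_cast; ring
    rw [hcast, ih (k + 1) (by simp only [List.length_cons] at hk; omega)]
    rw [pvEmitP]
    cases (r.length == 1 && pvIsV (r.headD ' ') && !decide (k = 0) && !t.isEmpty) with
    | true => simp
    | false => simp

-- ---------- pvEmitP ∘ pvRunsOf equals pvCore ----------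
-- head of a dropWhile fails the predicate
theorem pvDropHead (p : Char → Bool) : ∀ (l : List Char) (d : Char),
    (l.dropWhile p).head? = some d → p d = false := by
  intro l
  induction l with
  | nil => intro d h; simp [List.dropWhile] at h
  | cons a t ih =>
    intro d h
    by_cases hp : p a
    · rw [List.dropWhile_cons_of_pos hp] at h
      exact ih d h
    · rw [List.dropWhile_cons_of_neg hp] at h
      simp at h
      rw [← h]
      simpa using hp

-- consonant run
theorem pvCore_consRun : ∀ (r : List Char) (a : Char), pvIsV a = false →
    (∀ c ∈ r, pvIsV c = false) → ∀ (prev : Option Char) (rest : List Char),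
    pvCore prev (a :: r ++ rest) = a :: r ++ pvCore (some (r.getLastD a)) rest := by
  intro r
  induction r with
  | nil =>
    intro a ha _ prev rest
    simp [pvCore, pvCond, pvIsV] at ha ⊢
    simp [ha]
  | cons b t ih =>
    intro a ha hr prev rest
    have hb : pvIsV b = false := hr b (by simp)
    have ht : ∀ c ∈ t, pvIsV c = false := fun c hc => hr c (by simp [hc])
    have h1 : pvCore prev (a :: (b :: t) ++ rest)
        = a :: pvCore (some a) (b :: t ++ rest) := by
      simp [pvCore, pvCond]
      simp [pvIsV] at ha
      simp [ha]
    rw [h1, ih b hb ht (some a) rest]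
    simp [List.getLastD_eq_getLast?, pvLastShift]

-- vowel continuation (previous char is a vowel: nothing more is dropped until the run ends)
theorem pvCore_vowelCont : ∀ (ts : List Char) (a : Char), pvIsV a = true →
    (∀ c ∈ ts, pvIsV c = true) → ∀ (rest : List Char),
    pvCore (some a) (ts ++ rest) = ts ++ pvCore (some (ts.getLastD a)) rest := by
  intro ts
  induction ts with
  | nil => intro a _ _ rest; simp
  | cons x t ih =>
    intro a ha hts rest
    have hx : pvIsV x = true := hts x (by simp)
    have ht : ∀ c ∈ t, pvIsV c = true := fun c hc => hts c (by simp [hc])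
    have h1 : pvCore (some a) (x :: (t ++ rest)) = x :: pvCore (some x) (t ++ rest) := by
      simp [pvCore, pvCond]
      simp [pvIsV] at ha
      simp [ha]
    rw [List.cons_append, h1, ih x hx ht rest]
    simp [List.getLastD_eq_getLast?, pvLastShift]

theorem pvMain : ∀ (n : Nat) (cs : List Char), cs.length ≤ n → ∀ (prev : Option Char),
    (∀ p c, prev = some p → cs.head? = some c → pvIsV p = !pvIsV c) →
    pvEmitP (pvRunsOf cs) prev.isNone = pvCore prev cs := by
  intro n
  induction n with
  | zero =>
    intro cs hlen prev _
    have : cs = [] := by cases cs <;> simp_all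
    subst this
    simp [pvRunsOf, pvEmitP, pvCore]
  | succ n ih =>
    intro cs hlen prev hprev
    cases cs with
    | nil => simp [pvRunsOf, pvEmitP, pvCore]
    | cons c r0 =>
      rw [pvRunsOf]
      have htk_all : ∀ d ∈ r0.takeWhile (fun d => pvIsV d == pvIsV c), pvIsV d = pvIsV c := by
        intro d hd
        have := List.mem_takeWhile_imp hd
        simpa using this
      have hdr_head : ∀ d, (r0.dropWhile (fun d => pvIsV d == pvIsV c)).head? = some d →
          pvIsV d = !pvIsV c := by
        intro d hd
        have := pvDropHead _ r0 d hd
        simp at this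
        cases h : pvIsV c <;> cases h2 : pvIsV d <;> simp_all
      have hlast : pvIsV ((r0.takeWhile (fun d => pvIsV d == pvIsV c)).getLastD c) = pvIsV c := by
        have hm := List.getLastD_mem_cons (l := r0.takeWhile (fun d => pvIsV d == pvIsV c)) (a := c)
        rcases List.mem_cons.mp hm with h | h
        · rw [h]
        · exact htk_all _ h
      have hih : pvEmitP (pvRunsOf (r0.dropWhile (fun d => pvIsV d == pvIsV c))) false
          = pvCore (some ((r0.takeWhile (fun d => pvIsV d == pvIsV c)).getLastD c))
              (r0.dropWhile (fun d => pvIsV d == pvIsV c)) := by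
        have hl : (r0.dropWhile (fun d => pvIsV d == pvIsV c)).length ≤ n := by
          have := List.length_dropWhile_le (fun d => pvIsV d == pvIsV c) r0
          simp at hlen
          omega
        have := ih (r0.dropWhile (fun d => pvIsV d == pvIsV c)) hl
          (some ((r0.takeWhile (fun d => pvIsV d == pvIsV c)).getLastD c))
          (by
            intro p d hp hd
            injection hp with hp
            rw [← hp, hlast, hdr_head d hd]
            simp)
        simpa using this
      have hsplit : c :: r0
          = (c :: r0.takeWhile (fun d => pvIsV d == pvIsV c))
              ++ r0.dropWhile (fun d => pvIsV d == pvIsV c) := by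
        rw [List.cons_append, List.takeWhile_append_dropWhile]
      by_cases hvt : pvIsV c = true
      case neg =>
        have hv : pvIsV c = false := by revert hvt; cases pvIsV c <;> simp
        -- consonant run: kept, nothing dropped inside
        have hkeep : pvEmitP ((c :: r0.takeWhile (fun d => pvIsV d == pvIsV c)) ::
            pvRunsOf (r0.dropWhile (fun d => pvIsV d == pvIsV c))) prev.isNone
            = (c :: r0.takeWhile (fun d => pvIsV d == pvIsV c))
              ++ pvEmitP (pvRunsOf (r0.dropWhile (fun d => pvIsV d == pvIsV c))) false := by
          rw [pvEmitP]
          simp [hv]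
        rw [hkeep, hih, hsplit,
          pvCore_consRun (r0.takeWhile (fun d => pvIsV d == pvIsV c)) c hv
            (fun d hd => by rw [htk_all d hd, hv]) prev
            (r0.dropWhile (fun d => pvIsV d == pvIsV c))]
      case pos =>
        have hv : pvIsV c = true := hvt
        cases htk : r0.takeWhile (fun d => pvIsV d == pvIsV c) with
        | nil =>
          -- single-vowel run
          rw [htk] at hih hsplit
          simp only [List.cons_append, List.nil_append] at hsplit
          simp only [List.getLastD_nil] at hih
          rw [pvEmitP]
          conv_rhs => rw [hsplit]
          rw [pvCore]
          have hcond : pvCond prev c (r0.dropWhile (fun d => pvIsV d == pvIsV c)).head?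
              = (!prev.isNone &&
                 !(pvRunsOf (r0.dropWhile (fun d => pvIsV d == pvIsV c))).isEmpty) := by
            rw [pvCond]
            have hc1 : decide (c ∈ pvVowels) = true := hv
            rw [hc1]
            have hp : prev.any (fun pc => !decide (pc ∈ pvVowels)) = !prev.isNone := by
              cases prev with
              | none => rfl
              | some p =>
                have := hprev p c rfl rfl
                rw [hv] at this
                simp [pvIsV] at this
                simp [this]
            have hn : (r0.dropWhile (fun d => pvIsV d == pvIsV c)).head?.any
                (fun nc => !decide (nc ∈ pvVowels))
                = !(pvRunsOf (r0.dropWhile (fun d => pvIsV d == pvIsV c))).isEmpty := by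
              cases hh : (r0.dropWhile (fun d => pvIsV d == pvIsV c)).head? with
              | none =>
                have : r0.dropWhile (fun d => pvIsV d == pvIsV c) = [] :=
                  List.head?_eq_none_iff.mp hh
                simp [this, pvRunsOf]
              | some d =>
                have hd := hdr_head d hh
                rw [hv] at hd
                simp [pvIsV] at hd
                have hne : r0.dropWhile (fun d => pvIsV d == pvIsV c) ≠ [] := by
                  intro h; rw [h] at hh; simp at hh
                have : pvRunsOf (r0.dropWhile (fun d => pvIsV d == pvIsV c)) ≠ [] := by
                  rw [ne_eq, pvRunsOf_eq_nil]; exact hne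
                simp [hd, this]
            rw [hp, hn]
            simp
          rw [hcond, hih]
          simp only [List.length_cons, List.length_nil, List.headD_cons, hv]
          cases hb : (!prev.isNone &&
              !(pvRunsOf (r0.dropWhile (fun d => pvIsV d == pvIsV c))).isEmpty) with
          | true => simp
          | false => simp
        | cons x t =>
          -- vowel run of length ≥ 2: kept, nothing dropped inside
          rw [htk] at hih hsplit
          rw [List.cons_append] at hsplit
          have hx : pvIsV x = true := by
            have := htk_all x (by rw [htk]; simp)
            rw [this, hv]
          have ht : ∀ d ∈ t, pvIsV d = true := by
            intro d hd
            have := htk_all d (by rw [htk]; simp [hd])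
            rw [this, hv]
          rw [pvEmitP]
          have hfalse : ((c :: x :: t : List Char).length == 1 &&
              pvIsV ((c :: x :: t : List Char).headD ' ') && !prev.isNone &&
              !(pvRunsOf (r0.dropWhile (fun d => pvIsV d == pvIsV c))).isEmpty) = false := by
            simp
          rw [hfalse]
          simp only [Bool.false_eq_true, if_false]
          conv_rhs => rw [hsplit]
          have hstep : pvCore prev (c :: ((x :: t) ++ r0.dropWhile (fun d => pvIsV d == pvIsV c)))
              = c :: pvCore (some c) ((x :: t) ++ r0.dropWhile (fun d => pvIsV d == pvIsV c)) := by
            rw [pvCore]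
            have : pvCond prev c (((x :: t) ++
                r0.dropWhile (fun d => pvIsV d == pvIsV c)).head?) = false := by
              rw [pvCond]
              simp [pvIsV] at hx
              simp [hx]
            rw [this]
            simp
          rw [hstep,
            pvCore_vowelCont (x :: t) c hv (fun d hd => by
              rcases List.mem_cons.mp hd with h | h
              · rw [h]; exact hx
              · exact ht d h)
              (r0.dropWhile (fun d => pvIsV d == pvIsV c)),
            hih]
          simp

-- ===== VERDICT =====
theorem Sandwiched_Vowel_spec : Claim_equal_Sandwiched_Vowel := by
  intro s _
  show Sandwiched_Vowel s = Sandwiched_Vowel_alt s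
  simp only [Sandwiched_Vowel, Sandwiched_Vowel_alt]
  rw [pvA_main s.toList]
  have h1 := pvEnum (pvRunsOf s.toList).length (pvRunsOf s.toList) 0 (by simp) []
  simp only [Nat.cast_zero, List.flatten_nil, List.nil_append, decide_true] at h1
  have h2 := pvMain s.toList.length s.toList (le_refl _) none
    (by intro p c hp _; exact absurd hp (by simp))
  simp only [Option.isNone_none] at h2
  rw [h1, h2]
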